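-- pv_equiv track=rewrite | github.com/LouisLau-art/doubao-batch-translator | translator.py | create_optimal_batch
-- ===== SOURCE A (Python) =====
-- from typing import List, Dict, Any, Optional
--
-- def create_optimal_batch(items: List[Dict], max_chars: int = 500, max_items: int = 15) -> List[List[Dict]]:
--     """创建最优批次，考虑字符数和条目数限制"""
--     batches = []
--     current_batch = []
--     current_chars = 0
--
--     for item in items:
--         item_chars = len(item["original"])
--
--         # 检查是否需要开始新批次
--         if (current_batch and
--             (current_chars + item_chars > max_chars or
--              len(current_batch) >= max_items)):
--
--             batches.append(current_batch)
--             current_batch = []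
--             current_chars = 0
--
--         current_batch.append(item)
--         current_chars += item_chars
--
--     # 添加最后一个批次
--     if current_batch:
--         batches.append(current_batch)
--
--     return batches
-- ===== SOURCE B (Python) =====
-- def create_optimal_batch(items, max_chars=500, max_items=15):
--     """Prefix sums + per-batch binary search: since item lengths are non-negative,
--     the char budget is monotone in the batch end, so each batch end is found by
--     bisection over the prefix-sum array instead of scanning item by item."""
--     n = len(items)
--     pref = [0]
--     for d in items:
--         pref.append(pref[-1] + len(d["original"]))
--     batches = []
--     start = 0
--     while start < n:
--         # largest e in [start, min(n, start+max_items)] with pref[e]-pref[start] <= max_chars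
--         lo = start
--         hi = min(n, start + max_items)
--         while lo < hi:
--             mid = (lo + hi + 1) // 2
--             if pref[mid] - pref[start] <= max_chars:
--                 lo = mid
--             else:
--                 hi = mid - 1
--         end = max(lo, start + 1)  # an oversized first item still forms its own batch
--         batches.append(items[start:end])
--         start = end
--     return batches
-- ===== Notes on version B (the rewrite author's own statement) =====
-- stated objective: alternative
-- what changed: Replaces A's linear scan with running batch state by a two-stage algorithm: one pass builds a prefix-sum array of item lengths, then each batch end is found by binary search on the prefix sums (the char budget is monotone since lengths are non-negative), capped by max_items, and the batch is taken as a slice.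
import Mathlib
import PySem

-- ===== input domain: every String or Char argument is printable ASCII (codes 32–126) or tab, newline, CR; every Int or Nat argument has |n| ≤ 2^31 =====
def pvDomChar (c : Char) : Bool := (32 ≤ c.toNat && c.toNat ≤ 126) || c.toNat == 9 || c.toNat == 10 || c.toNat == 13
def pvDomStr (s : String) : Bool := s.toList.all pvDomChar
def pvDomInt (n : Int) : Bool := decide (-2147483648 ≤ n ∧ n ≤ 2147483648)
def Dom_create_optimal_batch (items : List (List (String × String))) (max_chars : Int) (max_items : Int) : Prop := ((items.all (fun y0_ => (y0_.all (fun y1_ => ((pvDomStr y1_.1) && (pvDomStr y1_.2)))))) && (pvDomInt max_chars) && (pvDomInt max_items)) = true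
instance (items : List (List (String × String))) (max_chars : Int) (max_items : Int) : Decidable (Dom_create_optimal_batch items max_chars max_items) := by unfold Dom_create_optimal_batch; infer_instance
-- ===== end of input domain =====

-- B is a different algorithm of the same cost: prefix sums of the item lengths plus a
-- per-batch binary search for the batch end, instead of A's linear scan with running state.

-- shared helper: len(item["original"]) (first matching key; 0 only outside Pre_, where Python raises KeyError)
def pvOrigLen (d : List (String × String)) : Int :=
  match d.find? (fun p => p.1 == "original") with
  | some p => PySem.Str.len p.2
  | none => 0

-- ===== PORT A =====
-- for-loop over items with state (batches, current_batch, current_chars); trailing flush.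
def pvLoopA (max_chars max_items : Int) :
    List (List (String × String)) → List (List (List (String × String))) →
    List (List (String × String)) → Int → List (List (List (String × String)))
  | [], batches, cur, _ => if cur = [] then batches else batches ++ [cur]
  | x :: rest, batches, cur, chars =>
      if cur ≠ [] ∧ (chars + pvOrigLen x > max_chars ∨ (cur.length : Int) ≥ max_items) then
        pvLoopA max_chars max_items rest (batches ++ [cur]) [x] (pvOrigLen x)
      else
        pvLoopA max_chars max_items rest batches (cur ++ [x]) (chars + pvOrigLen x)

def create_optimal_batch (items : List (List (String × String))) (max_chars : Int) (max_items : Int) : List (List (List (String × String))) :=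
  pvLoopA max_chars max_items items [] [] 0

-- ===== PORT B =====
-- pref list: pref = [0]; for d in items: pref.append(pref[-1] + len(d["original"]))
-- (pvPrefAux carries pref[-1] as the running value s; the full list is 0 :: pvPrefAux 0 items)
def pvPrefAux (s : Int) : List (List (String × String)) → List Int
  | [] => []
  | d :: rest => (s + pvOrigLen d) :: pvPrefAux (s + pvOrigLen d) rest

-- pref[i]; the default 0 is never used: every access in B is provably in range
def pvPrefGet (pref : List Int) (i : Int) : Int := PySem.List.pyGetD pref i 0

-- inner while loop: binary search for the largest e in [lo,hi] with pref[e]-pref[start] <= max_chars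
-- (the Python's local 'mid = (lo+hi+1)//2' is written out at each use)
def pvBSearch (pref : List Int) (max_chars start lo hi : Int) : Int :=
  if lo < hi then
    if pvPrefGet pref (PySem.Int.floordiv (lo + hi + 1) 2) - pvPrefGet pref start ≤ max_chars then
      pvBSearch pref max_chars start (PySem.Int.floordiv (lo + hi + 1) 2) hi
    else
      pvBSearch pref max_chars start lo (PySem.Int.floordiv (lo + hi + 1) 2 - 1)
  else lo
termination_by (hi - lo).toNat
decreasing_by
  all_goals
    have hm : PySem.Int.floordiv (lo + hi + 1) 2 = (lo + hi + 1) / 2 :=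
      PySem.Int.floordiv_eq_ediv_of_pos (by omega)
    rw [hm]
    omega

-- end = max(lo, start+1) where lo is the binary-search result
def pvEnd (pref : List Int) (max_chars max_items n start : Int) : Int :=
  max (pvBSearch pref max_chars start start (min n (start + max_items))) (start + 1)

-- needed by the outer loop's termination
theorem pvEnd_gt (pref : List Int) (max_chars max_items n start : Int) :
    start + 1 ≤ pvEnd pref max_chars max_items n start := by
  unfold pvEnd; omega

-- outer while loop over start; each batch is the slice items[start:end]
def pvOuterB (items : List (List (String × String))) (pref : List Int)
    (max_chars max_items n start : Int) : List (List (List (String × String))) :=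
  if start < n then
    PySem.List.slice items (some start) (some (pvEnd pref max_chars max_items n start)) ::
      pvOuterB items pref max_chars max_items n (pvEnd pref max_chars max_items n start)
  else []
termination_by (n - start).toNat
decreasing_by
  have := pvEnd_gt pref max_chars max_items n start
  omega

def create_optimal_batch_alt (items : List (List (String × String))) (max_chars : Int) (max_items : Int) : List (List (List (String × String))) :=
  pvOuterB items (0 :: pvPrefAux 0 items) max_chars max_items (items.length : Int) 0

-- ===== PRECONDITION & SPEC =====
-- Pre_ excludes exactly the inputs where A raises KeyError: an item without an "original" key.
def Pre_create_optimal_batch (items : List (List (String × String))) (max_chars : Int) (max_items : Int) : Prop :=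
  ∀ d ∈ items, (d.find? (fun p => p.1 == "original")).isSome = true
instance (items : List (List (String × String))) (max_chars : Int) (max_items : Int) : Decidable (Pre_create_optimal_batch items max_chars max_items) := by unfold Pre_create_optimal_batch; infer_instance

def pvWitness_create_optimal_batch : (List (List (String × String))) × Int × Int :=
  ([[("original", "hi")], [("original", "abc")]], 4, 15)

def Spec_create_optimal_batch (items : List (List (String × String))) (max_chars : Int) (max_items : Int) (out : List (List (List (String × String)))) : Prop := out = create_optimal_batch_alt items max_chars max_items
instance (items : List (List (String × String))) (max_chars : Int) (max_items : Int) (out : List (List (List (String × String)))) : Decidable (Spec_create_optimal_batch items max_chars max_items out) := by unfold Spec_create_optimal_batch; infer_instance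

-- ===== CLAIM (what is proved, stated in full; the proofs are below) =====
def Claim_equal_create_optimal_batch : Prop := ∀ (items : List (List (String × String))) (max_chars : Int) (max_items : Int), Dom_create_optimal_batch items max_chars max_items → Pre_create_optimal_batch items max_chars max_items → Spec_create_optimal_batch items max_chars max_items (create_optimal_batch items max_chars max_items)

-- ===== LEMMAS AND PROOFS =====

-- proof-side common recursion: chunking (first batch filled greedily, then the rest)
def pvFill (max_chars max_items : Int) :
    List (List (String × String)) → List (List (String × String)) → Int →
    List (List (String × String)) × List (List (String × String))
  | [], batch, _ => (batch, [])
  | x :: rest, batch, chars =>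
      if (batch.length : Int) < max_items ∧ chars + pvOrigLen x ≤ max_chars then
        pvFill max_chars max_items rest (batch ++ [x]) (chars + pvOrigLen x)
      else
        (batch, x :: rest)

theorem pvFill_length (max_chars max_items : Int) :
    ∀ (l batch : List (List (String × String))) (chars : Int),
      (pvFill max_chars max_items l batch chars).2.length ≤ l.length := by
  intro l
  induction l with
  | nil => intro batch chars; simp [pvFill]
  | cons x rest ih =>
      intro batch chars
      simp only [pvFill]
      split
      · exact Nat.le_succ_of_le (ih _ _)
      · simp

def pvChunk (max_chars max_items : Int) : List (List (String × String)) → List (List (List (String × String)))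
  | [] => []
  | x :: rest =>
      (pvFill max_chars max_items rest [x] (pvOrigLen x)).1 ::
        pvChunk max_chars max_items (pvFill max_chars max_items rest [x] (pvOrigLen x)).2
termination_by l => l.length
decreasing_by
  simp only [List.length_cons]
  exact Nat.lt_succ_of_le (pvFill_length max_chars max_items rest [x] (pvOrigLen x))

-- ----- A = pvChunk -----
theorem pvLoopA_eq (max_chars max_items : Int) :
    ∀ (l : List (List (String × String))) (batches : List (List (List (String × String))))
      (cur : List (List (String × String))) (chars : Int), cur ≠ [] →
      pvLoopA max_chars max_items l batches cur chars =
        batches ++ ((pvFill max_chars max_items l cur chars).1 ::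
          pvChunk max_chars max_items (pvFill max_chars max_items l cur chars).2) := by
  intro l
  induction l with
  | nil =>
      intro batches cur chars h
      simp [pvLoopA, pvFill, pvChunk, h]
  | cons x rest ih =>
      intro batches cur chars h
      simp only [pvLoopA, pvFill]
      by_cases hc : (cur.length : Int) < max_items ∧ chars + pvOrigLen x ≤ max_chars
      · have hflush : ¬ (cur ≠ [] ∧ (chars + pvOrigLen x > max_chars ∨ (cur.length : Int) ≥ max_items)) := by
          push_neg
          intro _
          omega
        rw [if_neg hflush, if_pos hc]
        exact ih batches (cur ++ [x]) (chars + pvOrigLen x) (by simp)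
      · have hflush : cur ≠ [] ∧ (chars + pvOrigLen x > max_chars ∨ (cur.length : Int) ≥ max_items) := by
          refine ⟨h, ?_⟩
          push_neg at hc
          by_cases hl : (cur.length : Int) < max_items
          · exact Or.inl (by have := hc hl; omega)
          · exact Or.inr (by omega)
        rw [if_pos hflush, if_neg hc]
        rw [ih (batches ++ [cur]) [x] (pvOrigLen x) (by simp)]
        conv_rhs => rw [pvChunk]
        simp

theorem A_eq_chunk (items : List (List (String × String))) (max_chars max_items : Int) :
    create_optimal_batch items max_chars max_items = pvChunk max_chars max_items items := by
  unfold create_optimal_batch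
  cases items with
  | nil => simp [pvLoopA, pvChunk]
  | cons x rest =>
      rw [pvChunk]
      simp only [pvLoopA]
      rw [if_neg (by simp)]
      simpa using pvLoopA_eq max_chars max_items rest [] [x] (pvOrigLen x) (by simp)

-- ----- prefix sums -----
def pvS (items : List (List (String × String))) (j : Nat) : Int :=
  ((items.take j).map pvOrigLen).sum

theorem pvOrigLen_nonneg (d : List (String × String)) : 0 ≤ pvOrigLen d := by
  unfold pvOrigLen
  cases d.find? (fun p => p.1 == "original") with
  | none => simp
  | some p => simp [PySem.Str.len]

theorem pvS_step (items : List (List (String × String))) (j : Nat) :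
    pvS items j ≤ pvS items (j + 1) := by
  unfold pvS
  rw [List.take_add_one]
  cases hj : items[j]? with
  | none => simp
  | some d => simp [pvOrigLen_nonneg d]

theorem pvS_mono (items : List (List (String × String))) {j k : Nat} (h : j ≤ k) :
    pvS items j ≤ pvS items k := by
  induction k with
  | zero => interval_cases j; exact le_refl _
  | succ k ihk =>
      by_cases hjk : j ≤ k
      · exact le_trans (ihk hjk) (pvS_step items k)
      · have : j = k + 1 := by omega
        subst this; exact le_refl _

theorem pvS_succ (items : List (List (String × String))) (j : Nat) (h : j < items.length) :
    pvS items (j + 1) = pvS items j + pvOrigLen items[j] := by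
  unfold pvS
  have hm : j < (items.map pvOrigLen).length := by simpa using h
  rw [List.map_take, List.map_take, List.take_add_one, List.getElem?_eq_getElem hm]
  simp

theorem pref_get (items : List (List (String × String))) :
    ∀ (s : Int) (j : Nat), j ≤ items.length →
      pvPrefGet (s :: pvPrefAux s items) (j : Int) = s + pvS items j := by
  induction items with
  | nil =>
      intro s j hj
      have : j = 0 := by simpa using hj
      subst this
      simp [pvPrefGet, pvPrefAux, pvS]
  | cons d rest ih =>
      intro s j hj
      cases j with
      | zero => simp [pvPrefGet, pvS]
      | succ j =>
          have h1 := ih (s + pvOrigLen d) j (by simpa using hj)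
          simp only [pvPrefGet, PySem.List.pyGetD_natCast, pvPrefAux] at h1 ⊢
          simp only [List.getD_cons_succ]
          rw [h1]
          have h2 : pvS (d :: rest) (j + 1) = pvOrigLen d + pvS rest j := by
            unfold pvS
            simp [List.take_succ_cons]
          rw [h2]; ring

-- ----- binary-search characterisation -----
theorem pvBSearch_spec (pref : List Int) (mc s : Int) :
    ∀ (k : Nat) (lo hi : Int), (hi - lo).toNat ≤ k → lo ≤ hi →
      (∀ e1 e2 : Int, lo ≤ e1 → e1 ≤ e2 → e2 ≤ hi →
        pvPrefGet pref e2 - pvPrefGet pref s ≤ mc → pvPrefGet pref e1 - pvPrefGet pref s ≤ mc) →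
      lo ≤ pvBSearch pref mc s lo hi ∧ pvBSearch pref mc s lo hi ≤ hi ∧
      (∀ e : Int, lo < e → e ≤ pvBSearch pref mc s lo hi → pvPrefGet pref e - pvPrefGet pref s ≤ mc) ∧
      (pvBSearch pref mc s lo hi = hi ∨
        (pvBSearch pref mc s lo hi + 1 ≤ hi ∧ ¬ pvPrefGet pref (pvBSearch pref mc s lo hi + 1) - pvPrefGet pref s ≤ mc)) := by
  intro k
  induction k with
  | zero =>
      intro lo hi hk hle _
      have heq : lo = hi := by omega
      rw [pvBSearch, if_neg (by omega)]
      subst heq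
      exact ⟨le_refl _, le_refl _, by intro e h1 h2; omega, Or.inl rfl⟩
  | succ k ih =>
      intro lo hi hk hle hdc
      by_cases hlt : lo < hi
      · have hm : PySem.Int.floordiv (lo + hi + 1) 2 = (lo + hi + 1) / 2 :=
          PySem.Int.floordiv_eq_ediv_of_pos (by omega)
        have hmid1 : lo < PySem.Int.floordiv (lo + hi + 1) 2 := by rw [hm]; omega
        have hmid2 : PySem.Int.floordiv (lo + hi + 1) 2 ≤ hi := by rw [hm]; omega
        rw [pvBSearch, if_pos hlt]
        set mid := PySem.Int.floordiv (lo + hi + 1) 2 with hmdef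
        by_cases hq : pvPrefGet pref mid - pvPrefGet pref s ≤ mc
        · rw [if_pos hq]
          have := ih mid hi (by omega) (by omega)
            (by intro e1 e2 h1 h2 h3 h4; exact hdc e1 e2 (by omega) h2 h3 h4)
          obtain ⟨r1, r2, r3, r4⟩ := this
          refine ⟨by omega, r2, ?_, r4⟩
          intro e he1 he2
          by_cases hem : e ≤ mid
          · exact hdc e mid (by omega) hem hmid2 hq
          · exact r3 e (by omega) he2
        · rw [if_neg hq]
          have := ih lo (mid - 1) (by omega) (by omega)
            (by intro e1 e2 h1 h2 h3 h4; exact hdc e1 e2 h1 h2 (by omega) h4)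
          obtain ⟨r1, r2, r3, r4⟩ := this
          refine ⟨r1, by omega, r3, ?_⟩
          rcases r4 with h | h
          · right; constructor
            · omega
            · rw [h]; simpa using hq
          · right; exact ⟨by omega, h.2⟩
      · rw [pvBSearch, if_neg hlt]
        have heq : lo = hi := by omega
        subst heq
        exact ⟨le_refl _, le_refl _, by intro e h1 h2; omega, Or.inl rfl⟩

-- ----- greedy fill characterised by an end index -----
theorem fill_spec (mc mi : Int) (items : List (List (String × String))) (s : Nat) :
    ∀ (k t : Nat), items.length - (s + 1 + t) ≤ k → s + 1 + t ≤ items.length →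
      ∃ e : Nat,
        pvFill mc mi (items.drop (s + 1 + t)) ((items.drop s).take (1 + t)) (pvS items (s + 1 + t) - pvS items s)
          = ((items.drop s).take (e - s), items.drop e)
        ∧ s + 1 + t ≤ e ∧ e ≤ items.length
        ∧ (∀ j : Nat, s + 1 + t ≤ j → j < e → ((j : Int) - s < mi ∧ pvS items (j + 1) - pvS items s ≤ mc))
        ∧ (e = items.length ∨ ¬ (((e : Int) - s < mi) ∧ pvS items (e + 1) - pvS items s ≤ mc)) := by
  intro k
  induction k with
  | zero =>
      intro t hk ht
      have heq : s + 1 + t = items.length := by omega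
      refine ⟨items.length, ?_, by omega, le_refl _, by intro j h1 h2; omega, Or.inl rfl⟩
      rw [heq]
      simp [pvFill]
      omega
  | succ k ih =>
      intro t hk ht
      by_cases hlt : s + 1 + t < items.length
      · have hdrop : items.drop (s + 1 + t) = items[s + 1 + t] :: items.drop (s + 1 + t + 1) := by
          exact (List.drop_eq_getElem_cons hlt)
        set x := items[s + 1 + t] with hx
        have hblen : ((items.drop s).take (1 + t)).length = 1 + t := by
          simp [List.length_take, List.length_drop]; omega
        have hchars : pvS items (s + 1 + t) - pvS items s + pvOrigLen x
            = pvS items (s + 1 + t + 1) - pvS items s := by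
          rw [pvS_succ items (s + 1 + t) hlt]; ring
        rw [hdrop]
        simp only [pvFill, hblen]
        by_cases hc : ((1 + t : Nat) : Int) < mi ∧ pvS items (s + 1 + t) - pvS items s + pvOrigLen x ≤ mc
        · rw [if_pos (by exact_mod_cast hc)]
          have happ : (items.drop s).take (1 + t) ++ [x] = (items.drop s).take (1 + (t + 1)) := by
            have hg : (items.drop s)[1 + t]? = some x := by
              rw [List.getElem?_drop, show s + (1 + t) = s + 1 + t from by omega]
              exact List.getElem?_eq_getElem hlt
            rw [show 1 + (t + 1) = (1 + t) + 1 from by omega, List.take_add_one, hg]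
            simp
          have harg : s + 1 + t + 1 = s + 1 + (t + 1) := by omega
          rw [happ, hchars, harg]
          obtain ⟨e, he, he1, he2, he3, he4⟩ := ih (t + 1) (by omega) (by omega)
          refine ⟨e, he, by omega, he2, ?_, he4⟩
          intro j hj1 hj2
          by_cases hjt : j = s + 1 + t
          · subst hjt
            constructor
            · have := hc.1; push_cast at this ⊢; omega
            · rw [show s + 1 + t + 1 = s + 1 + t + 1 by rfl]
              have := hc.2
              rw [hchars] at this
              exact this
          · exact he3 j (by omega) hj2
        · rw [if_neg (by exact_mod_cast hc)]
          refine ⟨s + 1 + t, ?_, le_refl _, by omega, by intro j h1 h2; omega, ?_⟩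
          · rw [← hdrop]
            congr 1
            congr 1
            omega
          · right
            intro hcon
            apply hc
            constructor
            · have := hcon.1; push_cast at this ⊢; omega
            · rw [hchars]; exact hcon.2
      · have heq : s + 1 + t = items.length := by omega
        refine ⟨items.length, ?_, by omega, le_refl _, by intro j h1 h2; omega, Or.inl rfl⟩
        rw [heq]
        simp [pvFill]
        omega

-- ----- outer loop = pvChunk -----
theorem outer_eq (items : List (List (String × String))) (mc mi : Int) :
    ∀ (k s : Nat), items.length - s ≤ k → s ≤ items.length →
      pvOuterB items (0 :: pvPrefAux 0 items) mc mi (items.length : Int) (s : Int)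
        = pvChunk mc mi (items.drop s) := by
  intro k
  induction k with
  | zero =>
      intro s hk hs
      have heq : s = items.length := by omega
      rw [pvOuterB, if_neg (by omega), heq]
      simp [pvChunk]
  | succ k ih =>
      intro s hk hs
      by_cases hlt : s < items.length
      · -- unfold pvChunk on the cons decomposition of items.drop s
        have hdrop : items.drop s = items[s] :: items.drop (s + 1) := List.drop_eq_getElem_cons hlt
        set n : Int := (items.length : Int) with hn
        set pref : List Int := 0 :: pvPrefAux 0 items with hpref
        have hgetS : ∀ j : Nat, j ≤ items.length → pvPrefGet pref (j : Int) = pvS items j := by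
          intro j hj
          rw [hpref]
          have := pref_get items 0 j hj
          omega
        -- the greedy fill end e
        have hfirst : pvOrigLen items[s] = pvS items (s + 1) - pvS items s := by
          rw [pvS_succ items s hlt]; ring
        have htake1 : ([items[s]] : List (List (String × String))) = (items.drop s).take 1 := by
          rw [hdrop, List.take_succ_cons, List.take_zero]
        obtain ⟨e, he, he1, he2, he3, he4⟩ :=
          fill_spec mc mi items s (items.length - (s + 1)) 0 (by omega) (by omega)
        simp only [Nat.add_zero] at he he1 he3 he4
        -- the binary-search end e'
        have hQmono : ∀ e1 e2 : Int, (s : Int) ≤ e1 → e1 ≤ e2 → e2 ≤ min n ((s : Int) + mi) →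
            pvPrefGet pref e2 - pvPrefGet pref (s : Int) ≤ mc →
            pvPrefGet pref e1 - pvPrefGet pref (s : Int) ≤ mc := by
          intro e1 e2 h1 h2 h3 h4
          have hb1 : e1 = ((e1.toNat : Nat) : Int) := by omega
          have hb2 : e2 = ((e2.toNat : Nat) : Int) := by omega
          rw [hb1, hgetS e1.toNat (by omega)]
          rw [hb2, hgetS e2.toNat (by omega)] at h4
          have := pvS_mono items (j := e1.toNat) (k := e2.toNat) (by omega)
          omega
        have hend : pvEnd pref mc mi n (s : Int) = (e : Int) := by
          unfold pvEnd
          by_cases hhi : (s : Int) ≤ min n ((s : Int) + mi)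
          · obtain ⟨r1, r2, r3, r4⟩ :=
              pvBSearch_spec pref mc (s : Int) (min n ((s:Int) + mi) - (s:Int)).toNat
                (s : Int) (min n ((s : Int) + mi)) (by omega) hhi hQmono
            set r := pvBSearch pref mc (s : Int) (s : Int) (min n ((s : Int) + mi)) with hr
            -- translate r's properties to pvS
            have hr3 : ∀ j : Nat, s < j → (j : Int) ≤ r → pvS items j - pvS items s ≤ mc := by
              intro j h1 h2
              have := r3 (j : Int) (by omega) h2
              rw [hgetS j (by omega), hgetS s (by omega)] at this
              exact this
            by_cases hrs : r ≤ (s : Int)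
            · -- result start: e' = s+1; show e = s+1
              have hmax : max r ((s : Int) + 1) = (s : Int) + 1 := by omega
              rw [hmax]
              have hes : e = s + 1 := by
                by_contra hne
                have hge : s + 1 + 1 ≤ e := by omega
                have hcond := he3 (s + 1) (by omega) (by omega)
                -- first conjunct: 1 < mi
                have hmi : (1 : Int) < mi := by
                  have := hcond.1; push_cast at this; omega
                -- so s+1 ≤ s+mi and s+1 ≤ n, hence r could be bigger: use r4
                have hhi2 : (s : Int) + 1 ≤ min n ((s : Int) + mi) := by omega
                rcases r4 with h | h
                · omega
                · have hr1 : r = (s : Int) := by omega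
                  have := h.2
                  rw [hr1] at this
                  have hgs : pvPrefGet pref ((s : Int) + 1) - pvPrefGet pref (s : Int) ≤ mc := by
                    have hx : ((s : Int) + 1) = ((s + 1 : Nat) : Int) := by push_cast; ring
                    rw [hx, hgetS (s + 1) (by omega), hgetS s (by omega)]
                    have h1 := hcond.2
                    have h2 := pvS_mono items (j := s + 1) (k := s + 1 + 1) (by omega)
                    omega
                  exact this hgs
              omega
            · -- result r ≥ s+1: e' = r; show e = r
              have hmax : max r ((s : Int) + 1) = r := by omega
              rw [hmax]
              by_contra hne
              by_cases hlt2 : (e : Int) < r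
              · -- then Cond e holds via r's properties, contradicting he4
                rcases he4 with h | h
                · omega
                · apply h
                  constructor
                  · have : (e : Int) + 1 ≤ (s : Int) + mi := by omega
                    omega
                  · have := hr3 (e + 1) (by omega) (by push_cast; omega)
                    omega
              · -- then r < e, so Cond r holds (via he3), contradicting r4
                have hlt3 : r < (e : Int) := by omega
                have hrnat : r = ((r.toNat : Nat) : Int) := by omega
                have hcond := he3 r.toNat (by omega) (by omega)
                rcases r4 with h | h
                · have h1 := hcond.1
                  omega
                · apply h.2
                  have hx : r + 1 = ((r.toNat + 1 : Nat) : Int) := by omega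
                  rw [hx, hgetS (r.toNat + 1) (by omega), hgetS s (by omega)]
                  have := hcond.2
                  have hy : ((r.toNat : Nat) : Int) = r := by omega
                  omega
          · -- hi < lo: no iterations, r = s, e' = s+1; mi ≤ 0 here, so e = s+1 as well
            have hr : pvBSearch pref mc (s : Int) (s : Int) (min n ((s : Int) + mi)) = (s : Int) := by
              rw [pvBSearch, if_neg (by omega)]
            rw [hr]
            have hmi : mi ≤ 0 := by omega
            have hes : e = s + 1 := by
              by_contra hne
              have hcond := he3 (s + 1) (by omega) (by omega)
              have := hcond.1; push_cast at this; omega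
            omega
        -- assemble
        rw [pvOuterB, if_pos (by omega), hend]
        have hslice : PySem.List.slice items (some (s : Int)) (some ((e : Int)))
            = (items.drop s).take (e - s) := by
          rw [PySem.List.slice_natCast]
        rw [hslice]
        conv_rhs => rw [hdrop]
        rw [pvChunk, htake1, hfirst, he]
        rw [ih e (by omega) he2]
      · have heq : s = items.length := by omega
        rw [pvOuterB, if_neg (by omega), heq]
        simp [pvChunk]

-- ===== VERDICT (by name: the statement is the Claim_ definition above) =====
theorem create_optimal_batch_spec : Claim_equal_create_optimal_batch := by
  intro items mc mi _ _
  unfold Spec_create_optimal_batch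
  rw [A_eq_chunk items mc mi]
  unfold create_optimal_batch_alt
  have := outer_eq items mc mi items.length 0 (by omega) (by omega)
  simpa using this.symm
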